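-- pv_equiv track=rewrite | github.com/fzingithub/SwordRefers2Offer | 4_LEETCODE/1_DataStructure/3_Stack/单调栈/视野总和.py | viewSum
-- ===== SOURCE A (Python) =====
-- def viewSum(data):
--     stack = [] #单调递增栈
--     res = 0
--     data.append(10**9) # 入栈最后一个元素设置为无限大 用于出栈
--
--
--     for i in range(len(data)):
--         if not stack or data[stack[-1]] > data[i]:
--             stack.append(i)
--         else:
--             while stack and data[stack[-1]] <= data[i]:
--                 top = stack.pop()
--                 res += i - top -1
--
--             stack.append(i)
--
--     return res
-- ===== SOURCE B (Python) =====
-- def viewSum(data):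
--     data.append(10 ** 9)
--     n = len(data)
--     total = 0
--     for i in range(n - 1):
--         for j in range(i + 1, n):
--             if data[j] >= data[i]:
--                 total += j - i - 1
--                 break
--     return total
-- ===== Notes on version B (the rewrite author's own statement) =====
-- stated objective: simpler
-- what changed: Replaces the monotonic index stack with a direct nested scan: after appending the same 10**9 sentinel, for each index i it scans rightward for the first j with data[j] >= data[i] and adds j-i-1, instead of maintaining a stack and settling contributions on pops.
import Mathlib
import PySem

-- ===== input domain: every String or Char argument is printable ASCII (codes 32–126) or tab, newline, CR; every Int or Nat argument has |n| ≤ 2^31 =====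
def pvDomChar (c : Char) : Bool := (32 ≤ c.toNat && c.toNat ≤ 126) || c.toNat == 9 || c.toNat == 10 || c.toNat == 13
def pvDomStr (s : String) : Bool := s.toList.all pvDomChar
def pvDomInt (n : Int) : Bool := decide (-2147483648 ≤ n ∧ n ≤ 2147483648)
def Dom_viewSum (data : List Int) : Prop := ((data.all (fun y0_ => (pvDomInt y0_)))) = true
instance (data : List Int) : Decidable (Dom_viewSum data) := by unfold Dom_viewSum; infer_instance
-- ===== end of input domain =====

-- B replaces A's monotonic stack by a plain nested rightward scan (simpler, but O(n^2));
-- both append the 10**9 sentinel to their argument in Python (same observable mutation);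
-- the equivalence proved here is about the return value.


-- ===== PORT A =====
-- inner `while stack and data[stack[-1]] <= data[i]` loop (stack kept top-first)
def popA (e : List Int) (i : Nat) : List Nat → Int → List Nat × Int
  | [], res => ([], res)
  | t :: st, res =>
    if e.getD t 0 ≤ e.getD i 0 then popA e i st (res + ((i : Int) - (t : Int) - 1))
    else (t :: st, res)

-- one iteration of A's `for i in range(len(data))` loop
def stepA (e : List Int) (p : List Nat × Int) (i : Nat) : List Nat × Int :=
  match p.1 with
  | [] => (i :: p.1, p.2)
  | t :: _ =>
    if e.getD t 0 > e.getD i 0 then (i :: p.1, p.2)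
    else
      let q := popA e i p.1 p.2
      (i :: q.1, q.2)

def viewSum (data : List Int) : Int :=
  let e := data ++ [10 ^ 9]
  ((List.range e.length).foldl (stepA e) ([], 0)).2

-- ===== PORT B =====
-- inner `for j in range(i+1, n)` loop with its break
def scanB (e : List Int) (i : Nat) : List Nat → Int
  | [] => 0
  | j :: js => if e.getD j 0 ≥ e.getD i 0 then (j : Int) - (i : Int) - 1 else scanB e i js

def viewSum_alt (data : List Int) : Int :=
  let e := data ++ [10 ^ 9]
  let n := e.length
  (List.range (n - 1)).foldl
    (fun acc i => acc + scanB e i (List.range' (i + 1) (n - (i + 1)))) 0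

-- ===== PRECONDITION & SPEC =====
def Spec_viewSum (data : List Int) (out : Int) : Prop := out = viewSum_alt data
instance (data : List Int) (out : Int) : Decidable (Spec_viewSum data out) := by unfold Spec_viewSum; infer_instance

-- ===== CLAIM (what is proved, stated in full; the proofs are below) =====
def Claim_equal_viewSum : Prop := ∀ (data : List Int), Dom_viewSum data → Spec_viewSum data (viewSum data)

-- ===== LEMMAS AND PROOFS =====

-- value at index j (all accesses of both ports are in range, so getD is exact)
def vv (e : List Int) (j : Nat) : Int := e.getD j 0

-- contribution of index j once indices < i have been processed
def term (e : List Int) (i j : Nat) : Int := scanB e j (List.range' (j + 1) (i - (j + 1)))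

-- loop invariant of A's fold: the stack holds exactly the indices with no
-- witness yet, top-first (decreasing indices, increasing values), and res is
-- the sum of the already-settled contributions.
def InvA (e : List Int) (i : Nat) (st : List Nat) (res : Int) : Prop :=
  (∀ j, j ∈ st ↔ (j < i ∧ ∀ k, j < k → k < i → vv e k < vv e j))
  ∧ List.Pairwise (fun a b => b < a ∧ vv e a < vv e b) st
  ∧ res = ((List.range i).map (term e i)).sum

theorem popA_spec (e : List Int) (i : Nat) (st : List Nat) (res : Int) :
    popA e i st res = (st.dropWhile (fun t => decide (e.getD t 0 ≤ e.getD i 0)),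
      res + ((st.takeWhile (fun t => decide (e.getD t 0 ≤ e.getD i 0))).map
        (fun t : Nat => (i : Int) - (t : Int) - 1)).sum) := by
  induction st generalizing res with
  | nil => simp [popA]
  | cons t st ih =>
    simp only [popA]
    by_cases h : e.getD t 0 ≤ e.getD i 0
    · rw [if_pos h, ih, List.takeWhile_cons_of_pos (by simpa using h),
        List.dropWhile_cons_of_pos (by simpa using h), List.map_cons, List.sum_cons]
      simp only [Prod.mk.injEq]
      exact ⟨by trivial, by ring⟩
    · rw [if_neg h, List.takeWhile_cons_of_neg (by simpa using h),
        List.dropWhile_cons_of_neg (by simpa using h)]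
      simp

theorem takeWhile_eq_filter {α : Type} (P : α → Bool) (l : List α)
    (h : List.Pairwise (fun a b => P b = true → P a = true) l) :
    l.takeWhile P = l.filter P ∧ l.dropWhile P = l.filter (fun t => ! P t) := by
  induction l with
  | nil => simp
  | cons a l ih =>
    rcases List.pairwise_cons.1 h with ⟨ha, hl⟩
    by_cases hp : P a
    · constructor
      · rw [List.takeWhile_cons_of_pos hp, List.filter_cons_of_pos hp, (ih hl).1]
      · rw [List.dropWhile_cons_of_pos hp, List.filter_cons_of_neg (by simp [hp]),
          (ih hl).2]
    · have hall : ∀ b ∈ l, P b = false := fun b hb => by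
        by_contra hc; exact hp (ha b hb (by simpa using hc))
      have hpf : P a = false := by simpa using hp
      constructor
      · rw [List.takeWhile_cons_of_neg (by simp [hpf]),
          List.filter_cons_of_neg (by simp [hpf])]
        exact (List.filter_eq_nil_iff.2 fun b hb => by simp [hall b hb]).symm
      · rw [List.dropWhile_cons_of_neg (by simp [hpf]),
          List.filter_cons_of_pos (by simp [hpf])]
        have hfl : l.filter (fun t => ! P t) = l :=
          List.filter_eq_self.2 fun b hb => by simp [hall b hb]
        rw [hfl]

theorem scanB_no_witness (e : List Int) (j : Nat) (l : List Nat)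
    (h : ∀ k ∈ l, vv e k < vv e j) : scanB e j l = 0 := by
  induction l with
  | nil => rfl
  | cons k l ih =>
    have hk : ¬ e[j]?.getD 0 ≤ e[k]?.getD 0 := by
      have := h k (List.mem_cons_self ..)
      simp [vv, List.getD_eq_getElem?_getD] at this
      omega
    simp [scanB, hk, ih (fun x hx => h x (List.mem_cons_of_mem _ hx))]

theorem scanB_append_no (e : List Int) (j : Nat) (l l' : List Nat)
    (h : ∀ k ∈ l, vv e k < vv e j) : scanB e j (l ++ l') = scanB e j l' := by
  induction l with
  | nil => rfl
  | cons k l ih =>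
    have hk : ¬ e[j]?.getD 0 ≤ e[k]?.getD 0 := by
      have := h k (List.mem_cons_self ..)
      simp [vv, List.getD_eq_getElem?_getD] at this
      omega
    simp [scanB, hk, ih (fun x hx => h x (List.mem_cons_of_mem _ hx))]

theorem scanB_append_yes (e : List Int) (j : Nat) (l l' : List Nat)
    (h : ∃ k ∈ l, vv e j ≤ vv e k) : scanB e j (l ++ l') = scanB e j l := by
  induction l with
  | nil => simp at h
  | cons k l ih =>
    by_cases hk : e[j]?.getD 0 ≤ e[k]?.getD 0
    · simp [scanB, hk]
    · have h' : ∃ x ∈ l, vv e j ≤ vv e x := by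
        rcases h with ⟨x, hx, hvx⟩
        rcases List.mem_cons.1 hx with rfl | hx
        · exact absurd hvx (by simpa [vv, List.getD_eq_getElem?_getD] using hk)
        · exact ⟨x, hx, hvx⟩
      simp [scanB, hk, ih h']

theorem foldl_add_eq_sum (f : Nat → Int) (l : List Nat) (a : Int) :
    l.foldl (fun acc i => acc + f i) a = a + (l.map f).sum := by
  induction l generalizing a with
  | nil => simp
  | cons x l ih => simp [ih]; ring

theorem sum_map_add (f g : Nat → Int) (l : List Nat) :
    (l.map (fun x => f x + g x)).sum = (l.map f).sum + (l.map g).sum := by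
  induction l with
  | nil => simp
  | cons x l ih => simp [ih]; ring

theorem sum_map_ite (c : Nat → Bool) (f : Nat → Int) (l : List Nat) :
    (l.map (fun x => if c x then f x else 0)).sum = ((l.filter c).map f).sum := by
  induction l with
  | nil => simp
  | cons x l ih =>
    by_cases h : c x <;> simp [List.filter, h, ih]

theorem stepA_eq (e : List Int) (st : List Nat) (res : Int) (i : Nat) :
    stepA e (st, res) i = (i :: (popA e i st res).1, (popA e i st res).2) := by
  match st with
  | [] => simp [stepA, popA]
  | t :: st' =>
    by_cases hgt : e[i]?.getD 0 < e[t]?.getD 0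
    · have hle : ¬ e[t]?.getD 0 ≤ e[i]?.getD 0 := by omega
      simp [stepA, popA, hgt, hle]
    · simp [stepA, popA, hgt]

theorem inv_step (e : List Int) (i : Nat) (st : List Nat) (res : Int)
    (h : InvA e i st res) : InvA e (i + 1) (stepA e (st, res) i).1 (stepA e (st, res) i).2 := by
  obtain ⟨hmem, hpair, hres⟩ := h
  have hPimp : List.Pairwise (fun a b =>
      (fun t => decide (e.getD t 0 ≤ e.getD i 0)) b = true →
      (fun t => decide (e.getD t 0 ≤ e.getD i 0)) a = true) st := by
    refine hpair.imp ?_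
    intro a b hab
    simp only [decide_eq_true_eq]
    intro hb
    have hv := hab.2
    unfold vv at hv
    omega
  obtain ⟨htw, hdw⟩ := takeWhile_eq_filter _ st hPimp
  rw [stepA_eq, popA_spec, htw, hdw]
  refine ⟨?_, ?_, ?_⟩
  · -- membership characterisation
    intro j
    simp only [List.mem_cons, List.mem_filter, Bool.not_eq_eq_eq_not, Bool.not_true,
      decide_eq_false_iff_not]
    constructor
    · rintro (rfl | ⟨hj, hPf⟩)
      · exact ⟨Nat.lt_succ_self _, fun k hk1 hk2 => by omega⟩
      · obtain ⟨hji, hnoW⟩ := (hmem j).1 hj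
        have hvi : vv e i < vv e j := by unfold vv; omega
        refine ⟨by omega, fun k hk1 hk2 => ?_⟩
        rcases Nat.lt_succ_iff_lt_or_eq.1 hk2 with hk | rfl
        · exact hnoW k hk1 hk
        · exact hvi
    · rintro ⟨hj, hnoW⟩
      rcases Nat.lt_succ_iff_lt_or_eq.1 hj with hj' | rfl
      · right
        have hjst : j ∈ st := (hmem j).2 ⟨hj', fun k hk1 hk2 => hnoW k hk1 (by omega)⟩
        refine ⟨hjst, ?_⟩
        have := hnoW i hj' (Nat.lt_succ_self _)
        unfold vv at this
        omega
      · left; rfl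
  · -- pairwise
    refine List.pairwise_cons.2 ⟨?_, List.Pairwise.sublist List.filter_sublist hpair⟩
    intro b hb
    rw [List.mem_filter] at hb
    obtain ⟨hbst, hPb⟩ := hb
    have hbi := ((hmem b).1 hbst).1
    have hblt : ¬ (e.getD b 0 ≤ e.getD i 0) := by simpa using hPb
    exact ⟨hbi, by unfold vv; omega⟩
  · -- the sum
    rw [List.range_succ, List.map_append, List.sum_append]
    have hlast : (List.map (term e (i + 1)) [i]).sum = 0 := by
      simp [term, scanB]
    have hstep : ∀ j ∈ List.range i, term e (i + 1) j =
        term e i j + (if decide (j ∈ st) && decide (e.getD j 0 ≤ e.getD i 0)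
          then (i : Int) - (j : Nat) - 1 else 0) := by
      intro j hj
      rw [List.mem_range] at hj
      have h1 : i + 1 - (j + 1) = (i - (j + 1)) + 1 := by omega
      have h2 : (j + 1) + (i - (j + 1)) = i := by omega
      have hext : term e (i + 1) j
          = scanB e j (List.range' (j + 1) (i - (j + 1)) ++ [i]) := by
        rw [term, h1, List.range'_concat]
        simp only [one_mul, h2]
      by_cases hjst : j ∈ st
      · obtain ⟨_, hnoW⟩ := (hmem j).1 hjst
        have hno : ∀ k ∈ List.range' (j + 1) (i - (j + 1)), vv e k < vv e j := by
          intro k hk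
          rw [List.mem_range'_1] at hk
          exact hnoW k (by omega) (by omega)
        rw [hext, scanB_append_no _ _ _ _ hno, term, scanB_no_witness _ _ _ hno]
        by_cases hPj : e[j]?.getD 0 ≤ e[i]?.getD 0
        · simp [scanB, hPj, hjst]
        · simp [scanB, hPj, hjst]
      · have hex : ∃ k ∈ List.range' (j + 1) (i - (j + 1)), vv e j ≤ vv e k := by
          have hni : ¬ (j < i ∧ ∀ k, j < k → k < i → vv e k < vv e j) :=
            fun hc => hjst ((hmem j).2 hc)
          push Not at hni
          obtain ⟨k, hk1, hk2, hk3⟩ := hni hj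
          exact ⟨k, List.mem_range'_1.2 ⟨by omega, by omega⟩, hk3⟩
        rw [hext, scanB_append_yes _ _ _ _ hex, term]
        simp [hjst]
    rw [List.map_congr_left hstep, sum_map_add, sum_map_ite, hlast, ← hres]
    have hnd : (st.filter (fun t => decide (e.getD t 0 ≤ e.getD i 0))).Nodup :=
      List.Nodup.filter _ (hpair.imp (fun h => h.1.ne'))
    have hnd2 : ((List.range i).filter
        (fun j => decide (j ∈ st) && decide (e.getD j 0 ≤ e.getD i 0))).Nodup :=
      List.Nodup.filter _ List.nodup_range
    have hperm : List.Perm (st.filter (fun t => decide (e.getD t 0 ≤ e.getD i 0)))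
        ((List.range i).filter
            (fun j => decide (j ∈ st) && decide (e.getD j 0 ≤ e.getD i 0))) := by
      refine (List.perm_ext_iff_of_nodup hnd hnd2).2 ?_
      intro x
      simp only [List.mem_filter, List.mem_range, Bool.and_eq_true, decide_eq_true_eq]
      constructor
      · rintro ⟨hx, hPx⟩
        exact ⟨((hmem x).1 hx).1, ⟨hx, hPx⟩⟩
      · rintro ⟨_, hx, hPx⟩
        exact ⟨hx, hPx⟩
    rw [List.Perm.sum_eq (hperm.map _)]
    ring

theorem inv_fold (e : List Int) (i : Nat) :
    InvA e i ((List.range i).foldl (stepA e) ([], 0)).1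
            ((List.range i).foldl (stepA e) ([], 0)).2 := by
  induction i with
  | zero => refine ⟨by simp, by simp, by simp⟩
  | succ i ih =>
    rw [List.range_succ, List.foldl_append, List.foldl_cons, List.foldl_nil]
    exact inv_step e i _ _ ih

-- ===== VERDICT (by name: the statement is the Claim_ definition above) =====
theorem viewSum_spec : Claim_equal_viewSum := by
  intro data _
  unfold Spec_viewSum viewSum viewSum_alt
  have h := (inv_fold (data ++ [10 ^ 9]) (data ++ [10 ^ 9]).length).2.2
  simp only [h]
  rw [foldl_add_eq_sum, zero_add]
  have hn : (data ++ [10 ^ 9]).length = data.length + 1 := by simp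
  rw [hn]
  have hn1 : data.length + 1 - 1 = data.length := rfl
  rw [hn1, List.range_succ, List.map_append, List.sum_append]
  have hlast : (List.map (term (data ++ [10 ^ 9]) (data.length + 1)) [data.length]).sum = 0 := by
    simp [term, scanB]
  rw [hlast, add_zero]
  rfl
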